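-- pv_equiv track=rewrite | github.com/rezmansouri/ar-track | src/dataset/downloader.py | get_still_arnos
-- ===== SOURCE A (Python) =====
-- def longest_consecutive_subarray(nums):
--     longest_streak = 0
--     current_streak = 1
--
--     for i in range(1, len(nums)):
--         if nums[i] == nums[i - 1] + 1:
--             current_streak += 1
--         else:
--             longest_streak = (
--                 longest_streak if longest_streak > current_streak else current_streak
--             )
--             current_streak = 1
--     longest_streak = (
--         longest_streak if longest_streak > current_streak else current_streak
--     )
--     return longest_streak
--
-- def get_still_arnos(all_ars):
--     counts = dict()
--     n_thresh = 5
--     for i, instance in enumerate(all_ars):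
--         if i == len(all_ars) - 1:
--             break
--         other_instance = all_ars[i + 1]
--         for ar_no in instance:
--             min_x_a, min_y_a, width_a, height_a = instance[ar_no]
--             if ar_no not in other_instance:
--                 continue
--             min_x_b, min_y_b, width_b, height_b = other_instance[ar_no]
--             if (
--                 min_x_a == min_x_b
--                 and min_y_a == min_y_b
--                 and width_a == width_b
--                 and height_a == height_b
--             ):
--                 if ar_no in counts:
--                     counts[ar_no].append(i + 1)
--                 else:
--                     counts[ar_no] = [i, i + 1]
--     counts = {ar_no: list(c) for ar_no, c in counts.items()}
--     new_counts = {ar_no: [] for ar_no in counts}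
--     for ar_no in counts:
--         for i in range(len(counts[ar_no]) - 1):
--             if counts[ar_no][i] == counts[ar_no][i + 1] - 1:
--                 new_counts[ar_no].append(counts[ar_no][i])
--     new_new_counts = {
--         ar_no: longest_consecutive_subarray(new_counts[ar_no]) for ar_no in new_counts
--     }
--     stills = [ar_no for ar_no in new_new_counts if new_new_counts[ar_no] >= n_thresh]
--     return stills
-- ===== SOURCE B (Python) =====
-- def get_still_arnos(all_ars):
--     n_thresh = 5
--     counts = {}
--     for i, (instance, nxt) in enumerate(zip(all_ars, all_ars[1:])):
--         for ar_no, box in instance.items():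
--             if nxt.get(ar_no) == box:
--                 if ar_no in counts:
--                     counts[ar_no].append(i + 1)
--                 else:
--                     counts[ar_no] = [i, i + 1]
--     stills = []
--     for ar_no, c in counts.items():
--         best, cur, prev = 0, 0, None
--         for v in c:
--             cur = cur + 1 if prev is not None and v == prev + 1 else 1
--             if cur > best:
--                 best = cur
--             prev = v
--         if best - 1 >= n_thresh:
--             stills.append(ar_no)
--     return stills
-- ===== Notes on version B (the rewrite author's own statement) =====
-- stated objective: simpler
-- what changed: B pairs consecutive frames with zip(all_ars, all_ars[1:]) and compares boxes as whole tuples, and it replaces A's three post-processing passes (dict rebuild, per-AR adjacent-pair filter loop, and the longest_consecutive_subarray helper) by a single streak scan per AR that finds the longest run of consecutive frame indices in the same counts list, subtracts 1 and thresholds.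
import Mathlib
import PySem

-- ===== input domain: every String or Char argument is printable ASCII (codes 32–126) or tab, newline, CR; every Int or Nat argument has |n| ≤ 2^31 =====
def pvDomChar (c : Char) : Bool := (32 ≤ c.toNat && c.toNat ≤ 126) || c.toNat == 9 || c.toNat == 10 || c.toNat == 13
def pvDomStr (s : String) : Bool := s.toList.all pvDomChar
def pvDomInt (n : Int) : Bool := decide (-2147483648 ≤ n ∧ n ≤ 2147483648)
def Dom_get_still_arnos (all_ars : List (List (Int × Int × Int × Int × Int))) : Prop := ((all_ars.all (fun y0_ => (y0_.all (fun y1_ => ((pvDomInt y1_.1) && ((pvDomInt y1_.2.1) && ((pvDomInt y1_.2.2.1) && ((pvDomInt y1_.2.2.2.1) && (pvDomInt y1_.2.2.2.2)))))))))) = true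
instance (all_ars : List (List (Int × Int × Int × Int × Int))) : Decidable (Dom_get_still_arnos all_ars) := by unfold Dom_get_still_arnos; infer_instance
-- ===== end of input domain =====

-- B replaces A's three post-processing passes (dict copy, adjacent-pair filter loop,
-- longest_consecutive_subarray) by one streak scan per AR over the same counts lists;
-- objective: simpler.

-- ===== PORT A =====
-- dict-style first-match lookup in an instance (assoc list of 5-tuples; used by both ports)
def arLookup (inst : List (Int × Int × Int × Int × Int)) (k : Int) :
    Option (Int × Int × Int × Int) :=
  (inst.find? (fun e => e.1 == k)).map (fun e => e.2)

def longest_consecutive_subarray (nums : List Int) : Int :=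
  let st := (PySem.List.pyRange 1 (nums.length : Int) 1).foldl
    (fun (p : Int × Int) i =>
      if PySem.List.pyGetD nums i 0 = PySem.List.pyGetD nums (i - 1) 0 + 1 then
        (p.1, p.2 + 1)
      else
        ((if p.1 > p.2 then p.1 else p.2), 1))
    ((0 : Int), (1 : Int))
  if st.1 > st.2 then st.1 else st.2

def matchStepA (i : Int) (instance_ other : List (Int × Int × Int × Int × Int))
    (counts : PySem.Dict Int (List Int)) : PySem.Dict Int (List Int) :=
  instance_.foldl (fun counts e =>
    let ar_no := e.1
    match arLookup instance_ ar_no with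
    | none => counts            -- unreachable: ar_no is a key of instance_
    | some a =>
      match arLookup other ar_no with
      | none => counts          -- 'continue'
      | some b =>
        if a.1 = b.1 ∧ a.2.1 = b.2.1 ∧ a.2.2.1 = b.2.2.1 ∧ a.2.2.2 = b.2.2.2 then
          if counts.contains ar_no then counts.modify ar_no [] (fun l => l ++ [i + 1])
          else counts.insert ar_no [i, i + 1]
        else counts) counts

def outerA (all : List (List (Int × Int × Int × Int × Int))) :
    List (Int × List (Int × Int × Int × Int × Int)) → PySem.Dict Int (List Int) →
    PySem.Dict Int (List Int)
  | [], counts => counts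
  | (i, instance_) :: rest, counts =>
    if i = (all.length : Int) - 1 then counts   -- break
    else outerA all rest
      (matchStepA i instance_ ((PySem.List.pyGet? all (i + 1)).getD []) counts)
      -- index i+1 is in range here (i < len-1), so the [] default is never used

def get_still_arnos (all_ars : List (List (Int × Int × Int × Int × Int))) : List Int :=
  let n_thresh : Int := 5
  let counts := outerA all_ars (PySem.List.enumerate all_ars) PySem.Dict.empty
  let counts2 := counts.items.foldl (fun d kv => d.insert kv.1 kv.2) PySem.Dict.empty
  let new0 := counts2.keys.foldl
    (fun d k => d.insert k ([] : List Int)) PySem.Dict.empty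
  let new_counts := counts2.keys.foldl (fun d k =>
    (PySem.List.pyRange 0 ((counts2.getD k []).length - 1) 1).foldl (fun d i =>
      if PySem.List.pyGetD (counts2.getD k []) i 0 =
         PySem.List.pyGetD (counts2.getD k []) (i + 1) 0 - 1 then
        d.modify k [] (fun l => l ++ [PySem.List.pyGetD (counts2.getD k []) i 0])
      else d) d) new0
  let new_new := new_counts.keys.foldl
    (fun d k => d.insert k (longest_consecutive_subarray (new_counts.getD k [])))
    PySem.Dict.empty
  new_new.keys.foldl
    (fun stills k => if new_new.getD k 0 ≥ n_thresh then stills ++ [k] else stills) []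

-- ===== PORT B =====
def bestRun (c : List Int) : Int :=
  (c.foldl (fun (s : Int × Int × Option Int) v =>
    let cur := match s.2.2 with | some p => if v = p + 1 then s.2.1 + 1 else 1 | none => 1
    let best := if cur > s.1 then cur else s.1
    (best, cur, some v)) ((0 : Int), (0 : Int), (none : Option Int))).1

def matchStepB (i : Int) (instance_ nxt : List (Int × Int × Int × Int × Int))
    (counts : PySem.Dict Int (List Int)) : PySem.Dict Int (List Int) :=
  instance_.foldl (fun counts e =>
    if arLookup nxt e.1 = some e.2 then
      if counts.contains e.1 then counts.modify e.1 [] (fun l => l ++ [i + 1])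
      else counts.insert e.1 [i, i + 1]
    else counts) counts

def get_still_arnos_alt (all_ars : List (List (Int × Int × Int × Int × Int))) : List Int :=
  let n_thresh : Int := 5
  let counts := (PySem.List.enumerate
      (all_ars.zip (PySem.List.slice all_ars (some 1) none))).foldl
    (fun counts ip => matchStepB ip.1 ip.2.1 ip.2.2 counts) PySem.Dict.empty
  counts.items.foldl
    (fun stills kv => if bestRun kv.2 - 1 ≥ n_thresh then stills ++ [kv.1] else stills) []

-- ===== PRECONDITION & SPEC =====
-- Pre_ excludes inputs where some frame's association list repeats an ar_no key: such
-- lists do not represent any Python dict (a dict cannot hold a key twice), and on them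
-- the two ports traverse the duplicate entries differently.
def Pre_get_still_arnos (all_ars : List (List (Int × Int × Int × Int × Int))) : Prop :=
  ∀ inst ∈ all_ars, (inst.map (fun x => x.1)).Nodup
instance (all_ars : List (List (Int × Int × Int × Int × Int))) : Decidable (Pre_get_still_arnos all_ars) := by unfold Pre_get_still_arnos; infer_instance
def pvWitness_get_still_arnos : (List (List (Int × Int × Int × Int × Int))) :=
  ([[(1, 2, 3, 4, 5)], [(1, 2, 3, 4, 5)], [(2, 0, 0, 1, 1)]])
def Spec_get_still_arnos (all_ars : List (List (Int × Int × Int × Int × Int))) (out : List Int) : Prop := out = get_still_arnos_alt all_ars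
instance (all_ars : List (List (Int × Int × Int × Int × Int))) (out : List Int) : Decidable (Spec_get_still_arnos all_ars out) := by unfold Spec_get_still_arnos; infer_instance

-- ===== CLAIM (what is proved, stated in full; the proofs are below) =====
def Claim_equal_get_still_arnos : Prop := ∀ (all_ars : List (List (Int × Int × Int × Int × Int))), Dom_get_still_arnos all_ars → Pre_get_still_arnos all_ars → Spec_get_still_arnos all_ars (get_still_arnos all_ars)

-- ===== LEMMAS AND PROOFS =====

-- keep x from each adjacent pair (x, y) with x = y - 1
def pvPK : List Int → List Int
  | x :: y :: t => if x = y - 1 then x :: pvPK (y :: t) else pvPK (y :: t)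
  | _ => []

-- reference streak scan: prev, cur, best
def pvBF : Int → Int → Int → List Int → Int
  | _, _, best, [] => best
  | p, cur, best, v :: t =>
    pvBF v (if v = p + 1 then cur + 1 else 1) (max best (if v = p + 1 then cur + 1 else 1)) t

theorem pvBF_ge (t : List Int) : ∀ (p cur best : Int), best ≤ pvBF p cur best t := by
  induction t with
  | nil => intro p cur best; simp [pvBF]
  | cons v t ih =>
    intro p cur best
    simp only [pvBF]
    exact le_trans (le_max_left _ _) (ih _ _ _)

theorem pvBF_max (t : List Int) : ∀ (p cur best : Int), 1 ≤ cur → cur ≤ best →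
    pvBF p cur best t = max best (pvBF p cur cur t) := by
  induction t with
  | nil => intro p cur best h1 h2; simp [pvBF]; omega
  | cons v t ih =>
    intro p cur best h1 h2
    by_cases hv : v = p + 1
    · simp only [pvBF, if_pos hv]
      rw [ih v (cur+1) (max best (cur+1)) (by omega) (by omega),
          ih v (cur+1) (max cur (cur+1)) (by omega) (by omega)]
      have := pvBF_ge t v (cur+1) (cur+1)
      omega
    · simp only [pvBF, if_neg hv]
      rw [ih v 1 (max best 1) (by omega) (by omega),
          ih v 1 (max cur 1) (by omega) (by omega)]
      have := pvBF_ge t v 1 1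
      omega

theorem pvPK_subset : ∀ (c : List Int) (x : Int), x ∈ pvPK c → x ∈ c := by
  intro c
  induction c with
  | nil => intro x hx; simp [pvPK] at hx
  | cons a t ih =>
    intro x hx
    match t, hx with
    | [], hx => simp [pvPK] at hx
    | y :: t', hx =>
      simp only [pvPK] at hx
      split at hx
      · rcases List.mem_cons.mp hx with h | h
        · simp [h]
        · exact List.mem_cons_of_mem _ (ih x h)
      · exact List.mem_cons_of_mem _ (ih x hx)

-- the coupling lemma
theorem pvK : ∀ (t : List Int) (p cur0 best2 prev2 : Int),
    List.Pairwise (· < ·) (p :: t) → 1 ≤ cur0 → cur0 ≤ best2 → prev2 ≤ p - 1 →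
    pvBF prev2 cur0 best2 (pvPK (p :: t)) =
      max best2 (pvBF p ((if prev2 = p - 1 then cur0 else 0) + 1)
                        ((if prev2 = p - 1 then cur0 else 0) + 1) t - 1) := by
  intro t
  induction t with
  | nil =>
    intro p cur0 best2 prev2 _ h1 h2 _
    simp only [pvPK, pvBF]
    split <;> omega
  | cons y t' ih =>
    intro p cur0 best2 prev2 hch h1 h2 hp
    have hpy : p < y := (List.pairwise_cons.mp hch).1 y (by simp)
    have hch' : List.Pairwise (· < ·) (y :: t') := (List.pairwise_cons.mp hch).2
    by_cases hc : p = y - 1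
    · -- consecutive: pvPK gains p
      simp only [pvPK, if_pos hc]
      by_cases he : prev2 = p - 1
      · simp only [pvBF, if_pos (by omega : p = prev2 + 1)]
        rw [ih y (cur0 + 1) (max best2 (cur0 + 1)) p hch' (by omega) (by omega) (by omega)]
        simp only [if_pos (by omega : p = y - 1), if_pos he, if_pos (by omega : y = p + 1)]
        rw [show max (cur0 + 1) (cur0 + 1 + 1) = cur0 + 1 + 1 from by omega]
        have := pvBF_ge t' y (cur0 + 1 + 1) (cur0 + 1 + 1)
        omega
      · simp only [pvBF, if_neg (by omega : ¬ p = prev2 + 1)]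
        rw [ih y 1 (max best2 1) p hch' (by omega) (by omega) (by omega)]
        simp only [if_pos (by omega : p = y - 1), if_neg he, if_pos (by omega : y = p + 1)]
        norm_num
        have := pvBF_ge t' y 2 2
        omega
    · -- gap: pvPK gains nothing here
      simp only [pvPK, if_neg hc]
      rw [ih y cur0 best2 prev2 hch' h1 h2 (by omega)]
      simp only [if_neg (by omega : ¬ prev2 = y - 1)]
      conv_rhs => rw [pvBF]
      simp only [if_neg (by omega : ¬ y = p + 1)]
      rw [pvBF_max t' y 1 (max ((if prev2 = p - 1 then cur0 else 0) + 1) 1) (by omega) (by omega)]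
      norm_num
      have hX := pvBF_ge t' y 1 1
      split <;> omega

theorem pvBestRun_fold (t : List Int) : ∀ (p cur best : Int),
    ((t.foldl (fun (s : Int × Int × Option Int) v =>
      let cur := match s.2.2 with | some p => if v = p + 1 then s.2.1 + 1 else 1 | none => 1
      let best := if cur > s.1 then cur else s.1
      (best, cur, some v)) (best, cur, some p)).1) = pvBF p cur best t := by
  induction t with
  | nil => intro p cur best; simp [pvBF]
  | cons v t ih =>
    intro p cur best
    show (List.foldl _ ((if (if v = p + 1 then cur + 1 else 1) > best then
        (if v = p + 1 then cur + 1 else 1) else best),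
        (if v = p + 1 then cur + 1 else 1), some v) t).1 = _
    rw [show (if (if v = p + 1 then cur + 1 else 1) > best then
        (if v = p + 1 then cur + 1 else 1) else best)
        = max best (if v = p + 1 then cur + 1 else 1) from by split <;> omega]
    simp only [pvBF]
    exact ih v _ _

theorem pvBestRun_eq (c : List Int) :
    bestRun c = match c with | [] => 0 | v :: t => pvBF v 1 1 t := by
  cases c with
  | nil => simp [bestRun]
  | cons v t =>
    have h0 : bestRun (v :: t) = ((t.foldl (fun (s : Int × Int × Option Int) v =>
      let cur := match s.2.2 with | some p => if v = p + 1 then s.2.1 + 1 else 1 | none => 1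
      let best := if cur > s.1 then cur else s.1
      (best, cur, some v)) ((1 : Int), (1 : Int), some v)).1) := rfl
    rw [h0]
    exact pvBestRun_fold t v 1 1

-- generic: an index loop over adjacent pairs is a fold over zip with the tail
theorem pvRangeAdj {σ : Type} (c : List Int) (f : σ → Int → Int → σ) (init : σ) :
    ∀ (m : Nat), m ≤ (c.zip c.tail).length →
    (List.range m).foldl
      (fun s (k : Nat) => f s (PySem.List.pyGetD c (k : Int) 0) (PySem.List.pyGetD c ((k : Int) + 1) 0)) init
    = ((c.zip c.tail).take m).foldl (fun s p => f s p.1 p.2) init := by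
  have hzl : (c.zip c.tail).length = min c.length c.tail.length := List.length_zip
  have htl : c.tail.length = c.length - 1 := List.length_tail
  intro m
  induction m with
  | zero => intro _; simp
  | succ m ih =>
    intro hm
    have hm' : m < (c.zip c.tail).length := by omega
    have hlt : m < c.length := by omega
    have hlt1 : m + 1 < c.length := by omega
    rw [List.range_succ, List.foldl_append, ih (by omega), List.take_add_one]
    rw [List.getElem?_eq_getElem hm', List.foldl_append]
    simp only [List.foldl_cons, List.foldl_nil, Option.toList_some]
    rw [List.getElem_zip]
    have h1 : PySem.List.pyGetD c (m : Int) 0 = c.getD m 0 :=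
      PySem.List.pyGetD_natCast c m 0
    have h2 : PySem.List.pyGetD c ((m : Int) + 1) 0 = c.getD (m + 1) 0 := by
      rw [show ((m : Int) + 1) = ((m + 1 : Nat) : Int) from by push_cast; ring]
      exact PySem.List.pyGetD_natCast c (m + 1) 0
    rw [h1, h2]
    congr 1
    · exact List.getD_eq_getElem _ _ hlt
    · rw [List.getD_eq_getElem _ _ hlt1]
      exact (List.getElem_tail _).symm

theorem pvRangeAdjZero {σ : Type} (c : List Int) (f : σ → Int → Int → σ) (init : σ) :
    (PySem.List.pyRange 0 ((c.length : Int) - 1) 1).foldl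
      (fun s i => f s (PySem.List.pyGetD c i 0) (PySem.List.pyGetD c (i + 1) 0)) init
    = (c.zip c.tail).foldl (fun s p => f s p.1 p.2) init := by
  have hzl : (c.zip c.tail).length = min c.length c.tail.length := List.length_zip
  have htl : c.tail.length = c.length - 1 := List.length_tail
  rw [PySem.List.pyRange_one, List.foldl_map]
  have hm : ((c.length : Int) - 1 - 0).toNat = (c.zip c.tail).length := by omega
  have := pvRangeAdj c f init ((c.length : Int) - 1 - 0).toNat (le_of_eq hm)
  rw [hm, List.take_length] at this
  rw [← this, hm]
  apply PySem.List.foldl_congr_mem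
  intro acc k _
  simp only [zero_add]

theorem pvRangeAdjOne {σ : Type} (c : List Int) (g : σ → Int → Int → σ) (init : σ) :
    (PySem.List.pyRange 1 (c.length : Int) 1).foldl
      (fun s i => g s (PySem.List.pyGetD c (i - 1) 0) (PySem.List.pyGetD c i 0)) init
    = (c.zip c.tail).foldl (fun s p => g s p.1 p.2) init := by
  have hzl : (c.zip c.tail).length = min c.length c.tail.length := List.length_zip
  have htl : c.tail.length = c.length - 1 := List.length_tail
  rw [PySem.List.pyRange_one, List.foldl_map]
  have hm : ((c.length : Int) - 1).toNat = (c.zip c.tail).length := by omega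
  have := pvRangeAdj c (fun s a b => g s a b) init ((c.length : Int) - 1).toNat (le_of_eq hm)
  rw [hm, List.take_length] at this
  rw [← this, hm]
  apply PySem.List.foldl_congr_mem
  intro acc k _
  rw [show (1 + ((k : Nat) : Int)) - 1 = ((k : Nat) : Int) from by ring,
      show (1 + ((k : Nat) : Int)) = ((k : Nat) : Int) + 1 from by ring]

theorem pvLcsZip (t : List Int) : ∀ (x longest current : Int), 1 ≤ current →
    (let st := (((x :: t).zip t).foldl
      (fun (p : Int × Int) q =>
        if q.2 = q.1 + 1 then (p.1, p.2 + 1)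
        else ((if p.1 > p.2 then p.1 else p.2), 1)) (longest, current))
     (if st.1 > st.2 then st.1 else st.2)) = max longest (pvBF x current current t) := by
  induction t with
  | nil =>
    intro x longest current h1
    simp only [List.zip_nil_right, List.foldl_nil, pvBF]
    split <;> omega
  | cons y t' ih =>
    intro x longest current h1
    simp only [List.zip_cons_cons, List.foldl_cons]
    by_cases hm : y = x + 1
    · simp only [if_pos hm, pvBF]
      rw [ih y longest (current + 1) (by omega)]
      rw [show max current (current + 1) = current + 1 from by omega]
    · simp only [if_neg hm, pvBF]
      rw [ih y (if longest > current then longest else current) 1 (by omega)]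
      rw [show max current 1 = current from by omega,
          pvBF_max t' y 1 current (by omega) h1]
      have := pvBF_ge t' y 1 1
      split <;> omega

theorem pvZipPK : ∀ (c : List Int) (acc : List Int),
    (c.zip c.tail).foldl (fun s p => if p.1 = p.2 - 1 then s ++ [p.1] else s) acc
    = acc ++ pvPK c := by
  intro c
  induction c with
  | nil => intro acc; simp [pvPK]
  | cons x t ih =>
    intro acc
    match t with
    | [] => simp [pvPK]
    | y :: t' =>
      simp only [List.tail_cons, List.zip_cons_cons, List.foldl_cons, pvPK]
      by_cases hc : x = y - 1
      · simp only [if_pos hc]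
        have := ih (acc ++ [x])
        simp only [List.tail_cons] at this
        rw [this, List.append_assoc]
        rfl
      · simp only [if_neg hc]
        have := ih acc
        simp only [List.tail_cons] at this
        rw [this]

-- the A-side "kept indices" pass, as a value list
def pvPass (c : List Int) : List Int :=
  ((PySem.List.pyRange 0 ((c.length : Int) - 1) 1).filter
      (fun i => decide (PySem.List.pyGetD c i 0 = PySem.List.pyGetD c (i + 1) 0 - 1))).map
    (fun i => PySem.List.pyGetD c i 0)

theorem pvPass_eq_PK (c : List Int) : pvPass c = pvPK c := by
  have h := PySem.List.foldl_append_ite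
    (fun i => PySem.List.pyGetD c i 0 = PySem.List.pyGetD c (i + 1) 0 - 1)
    (fun i => PySem.List.pyGetD c i 0)
    (PySem.List.pyRange 0 ((c.length : Int) - 1) 1) []
  simp only [List.nil_append] at h
  rw [pvPass, ← h]
  rw [pvRangeAdjZero c (fun s a b => if a = b - 1 then s ++ [a] else s) []]
  rw [pvZipPK c []]
  simp

theorem pvLcs_struct (d : List Int) :
    longest_consecutive_subarray d
    = max 1 (match d with | [] => 0 | v :: t => pvBF v 1 1 t) := by
  rw [longest_consecutive_subarray]
  rw [pvRangeAdjOne d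
    (fun (p : Int × Int) a b => if b = a + 1 then (p.1, p.2 + 1)
      else ((if p.1 > p.2 then p.1 else p.2), 1)) ((0 : Int), (1 : Int))]
  cases d with
  | nil => simp
  | cons v t =>
    have := pvLcsZip t v 0 1 (by omega)
    simp only [List.tail_cons]
    simp only at this
    rw [this]
    have := pvBF_ge t v 1 1
    omega

theorem pvCondKey (c : List Int) (hch : List.Pairwise (· < ·) c) :
    (longest_consecutive_subarray (pvPass c) ≥ 5) ↔ (bestRun c - 1 ≥ 5) := by
  rw [pvPass_eq_PK, pvLcs_struct, pvBestRun_eq]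
  cases c with
  | nil => simp [pvPK]
  | cons p t =>
    have key : pvBF (p - 2) 1 1 (pvPK (p :: t))
        = max 1 (match pvPK (p :: t) with | [] => 0 | v :: t' => pvBF v 1 1 t') := by
      cases hPK : pvPK (p :: t) with
      | nil => simp [pvBF]
      | cons v t' =>
        have hv : v ∈ p :: t := pvPK_subset _ v (by rw [hPK]; simp)
        have hvp : p ≤ v := by
          rcases List.mem_cons.mp hv with h | h
          · omega
          · have := (List.pairwise_cons.mp hch).1 v h; omega
        simp only [pvBF, if_neg (by omega : ¬ v = (p - 2) + 1)]
        norm_num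
        have := pvBF_ge t' v 1 1
        omega
    have hK := pvK t p 1 1 (p - 2) hch (by omega) (by omega) (by omega)
    rw [if_neg (by omega : ¬ (p - 2) = p - 1)] at hK
    rw [← key, hK]
    rw [show (match p :: t with | [] => (0 : Int) | v :: t => pvBF v 1 1 t)
        = pvBF p 1 1 t from rfl]
    have h1 := pvBF_ge t p (0 + 1) (0 + 1)
    have h2 : pvBF p (0 + 1) (0 + 1) t = pvBF p 1 1 t := by norm_num
    rw [h2] at h1 ⊢
    omega

theorem pvLookup_nodup : ∀ (inst : List (Int × Int × Int × Int × Int))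
    (e : Int × Int × Int × Int × Int), e ∈ inst →
    (inst.map (fun x => x.1)).Nodup → arLookup inst e.1 = some e.2 := by
  intro inst
  induction inst with
  | nil => intro e he; simp at he
  | cons a l ih =>
    intro e he hnd
    simp only [List.map_cons, List.nodup_cons] at hnd
    rcases List.mem_cons.mp he with h | h
    · subst h
      simp [arLookup, List.find?_cons_of_pos]
    · have hne : a.1 ≠ e.1 := by
        intro hc
        exact hnd.1 (hc ▸ List.mem_map_of_mem h)
      simp only [arLookup] at ih ⊢
      rw [List.find?_cons_of_neg (by simp [hne])]
      exact ih e h hnd.2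

theorem pvStep_eq (i : Int) (inst other : List (Int × Int × Int × Int × Int))
    (hnd : (inst.map (fun x => x.1)).Nodup) (d : PySem.Dict Int (List Int)) :
    matchStepA i inst other d = matchStepB i inst other d := by
  unfold matchStepA matchStepB
  apply PySem.List.foldl_congr_mem
  intro acc e he
  obtain ⟨k, a1, a2, a3, a4⟩ := e
  show (match arLookup inst k with
    | none => acc
    | some a =>
      match arLookup other k with
      | none => acc
      | some b =>
        if a.1 = b.1 ∧ a.2.1 = b.2.1 ∧ a.2.2.1 = b.2.2.1 ∧ a.2.2.2 = b.2.2.2 then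
          if acc.contains k = true then acc.modify k [] (fun l => l ++ [i + 1])
          else acc.insert k [i, i + 1]
        else acc) = _
  rw [pvLookup_nodup inst ⟨k, a1, a2, a3, a4⟩ he hnd]
  cases hb : arLookup other k with
  | none => simp
  | some b =>
    obtain ⟨b1, b2, b3, b4⟩ := b
    simp only [Option.some_inj, Prod.mk.injEq]
    by_cases hcomp : a1 = b1 ∧ a2 = b2 ∧ a3 = b3 ∧ a4 = b4
    · obtain ⟨h1, h2, h3, h4⟩ := hcomp
      subst h1; subst h2; subst h3; subst h4
      simp
    · rw [if_neg hcomp, if_neg (by tauto)]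

theorem pvOuter_eq (all : List (List (Int × Int × Int × Int × Int)))
    (hnd : ∀ inst ∈ all, (inst.map (fun x => x.1)).Nodup) :
    ∀ (n i : Nat) (d : PySem.Dict Int (List Int)), all.length - i = n →
    outerA all (PySem.List.enumerate (all.drop i) (i : Int)) d
    = (PySem.List.enumerate ((all.drop i).zip (all.drop i).tail) (i : Int)).foldl
        (fun d2 ip => matchStepB ip.1 ip.2.1 ip.2.2 d2) d := by
  intro n
  induction n with
  | zero =>
    intro i d hn
    have : all.drop i = [] := List.drop_eq_nil_iff.mpr (by omega)
    simp [this, outerA]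
  | succ n ihn =>
    intro i d hn
    have hlen : (all.drop i).length = all.length - i := List.length_drop
    cases hdrop : all.drop i with
    | nil => simp [outerA]
    | cons x s =>
      cases s with
      | nil =>
        -- last frame: A breaks immediately, B has an empty zip
        have h1 : (i : Int) = (all.length : Int) - 1 := by
          rw [hdrop] at hlen; simp at hlen; omega
        simp [outerA, h1]
      | cons y s' =>
        have hge : i + 2 ≤ all.length := by rw [hdrop] at hlen; simp at hlen; omega
        have hne : ¬ ((i : Int) = (all.length : Int) - 1) := by omega
        have htl : all.drop (i + 1) = y :: s' := by
          rw [← List.tail_drop, hdrop]; rfl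
        have hget : PySem.List.pyGet? all ((i : Int) + 1) = some y := by
          rw [show ((i : Int) + 1) = ((i + 1 : Nat) : Int) from by push_cast; ring,
              PySem.List.pyGet?_natCast]
          have h0 : (all.drop (i + 1))[0]? = some y := by rw [htl]; rfl
          rw [List.getElem?_drop] at h0
          simpa using h0
        have hx : x ∈ all := List.drop_subset i all (by rw [hdrop]; simp)
        show outerA all (PySem.List.enumerate (x :: y :: s') (i : Int)) d = _
        rw [PySem.List.enumerate_cons]
        simp only [outerA]
        rw [if_neg hne, hget]
        simp only [Option.getD_some]
        rw [pvStep_eq _ _ _ (hnd x hx)]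
        have hIH := ihn (i + 1) (matchStepB (i : Int) x y d) (by omega)
        rw [htl] at hIH
        simp only [List.tail_cons] at hIH
        rw [show ((i : Nat) + 1 : Nat) = (i + 1 : Nat) from rfl] at hIH
        push_cast at hIH
        rw [hIH]
        show _ = (PySem.List.enumerate ((x, y) :: (y :: s').zip s') (i : Int)).foldl
          (fun d2 ip => matchStepB ip.1 ip.2.1 ip.2.2 d2) d
        rw [PySem.List.enumerate_cons, List.foldl_cons]

-- B's counts expression
theorem pvCounts_eq (all : List (List (Int × Int × Int × Int × Int)))
    (hnd : ∀ inst ∈ all, (inst.map (fun x => x.1)).Nodup) :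
    outerA all (PySem.List.enumerate all) PySem.Dict.empty
    = (PySem.List.enumerate (all.zip (PySem.List.slice all (some 1) none))).foldl
        (fun d2 ip => matchStepB ip.1 ip.2.1 ip.2.2 d2) PySem.Dict.empty := by
  have h := pvOuter_eq all hnd all.length 0 PySem.Dict.empty (by omega)
  simp only [List.drop_zero, Nat.cast_zero] at h
  rw [show ((1 : Int)) = ((1 : Nat) : Int) from by norm_num,
      PySem.List.slice_from_natCast, List.drop_one]
  exact h

-- nodup keys invariant
theorem pvStepB_nodup (i : Int) (nxt : List (Int × Int × Int × Int × Int)) :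
    ∀ (l : List (Int × Int × Int × Int × Int)) (d : PySem.Dict Int (List Int)),
    d.keys.Nodup → (matchStepB i l nxt d).keys.Nodup := by
  intro l
  induction l with
  | nil => intro d h; exact h
  | cons e l ih =>
    intro d h
    show (matchStepB i l nxt (if arLookup nxt e.1 = some e.2 then
      (if d.contains e.1 = true then d.modify e.1 [] (fun v => v ++ [i + 1])
       else d.insert e.1 [i, i + 1]) else d)).keys.Nodup
    split
    · split
      · apply ih
        rw [PySem.Dict.keys_modify]
        exact PySem.Dict.nodup_keys_insert _ _ _ h
      · exact ih _ (PySem.Dict.nodup_keys_insert _ _ _ h)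
    · exact ih _ h

theorem pvOuterB_nodup (ps : List (List (Int × Int × Int × Int × Int) × List (Int × Int × Int × Int × Int))) :
    ∀ (s : Int) (d : PySem.Dict Int (List Int)), d.keys.Nodup →
    ((PySem.List.enumerate ps s).foldl
      (fun d2 ip => matchStepB ip.1 ip.2.1 ip.2.2 d2) d).keys.Nodup := by
  induction ps with
  | nil => intro s d h; exact h
  | cons p ps ih =>
    intro s d h
    rw [PySem.List.enumerate_cons, List.foldl_cons]
    exact ih (s + 1) _ (pvStepB_nodup s p.2 p.1 d h)

-- value invariant: strictly increasing, all entries ≤ bound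
theorem pvInnerB_inv (i : Int) (nxt : List (Int × Int × Int × Int × Int)) :
    ∀ (l : List (Int × Int × Int × Int × Int)) (d : PySem.Dict Int (List Int)),
    (l.map (fun x => x.1)).Nodup →
    (∀ k, List.Pairwise (· < ·) (d.getD k [])) →
    (∀ k x, x ∈ d.getD k [] → x ≤ i + 1) →
    (∀ e ∈ l, ∀ x, x ∈ d.getD e.1 [] → x ≤ i) →
    (∀ k, List.Pairwise (· < ·) ((matchStepB i l nxt d).getD k [])
      ∧ ∀ x, x ∈ (matchStepB i l nxt d).getD k [] → x ≤ i + 1) := by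
  intro l
  induction l with
  | nil => intro d _ h1 h2 _ k; exact ⟨h1 k, h2 k⟩
  | cons e l ih =>
    intro d hnd h1 h2 h3
    simp only [List.map_cons, List.nodup_cons] at hnd
    rw [show matchStepB i (e :: l) nxt d = matchStepB i l nxt
      (if arLookup nxt e.1 = some e.2 then
        (if d.contains e.1 = true then d.modify e.1 [] (fun v => v ++ [i + 1])
         else d.insert e.1 [i, i + 1]) else d) from rfl]
    split
    · split
      · -- append i+1 to the run of e.1
        rename_i hcont
        apply ih _ hnd.2
        · intro k
          rw [PySem.Dict.getD_modify]
          split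
          · rename_i hk; subst hk
            rw [List.pairwise_append]
            refine ⟨h1 _, by simp, ?_⟩
            intro a ha b hb
            simp at hb
            subst hb
            have := h3 e (by simp) a ha
            omega
          · exact h1 k
        · intro k x hx
          rw [PySem.Dict.getD_modify] at hx
          split at hx
          · rcases List.mem_append.mp hx with h | h
            · exact h2 _ x h
            · simp at h; omega
          · exact h2 k x hx
        · intro e' he' x hx
          rw [PySem.Dict.getD_modify] at hx
          split at hx
          · exfalso
            rename_i hk
            exact hnd.1 (hk ▸ List.mem_map_of_mem he')
          · exact h3 e' (by simp [he']) x hx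
      · -- fresh key: [i, i+1]
        apply ih _ hnd.2
        · intro k
          rw [PySem.Dict.getD_insert]
          split
          · simp
          · exact h1 k
        · intro k x hx
          rw [PySem.Dict.getD_insert] at hx
          split at hx
          · simp at hx; omega
          · exact h2 k x hx
        · intro e' he' x hx
          rw [PySem.Dict.getD_insert] at hx
          split at hx
          · exfalso
            rename_i hk
            exact hnd.1 (hk ▸ List.mem_map_of_mem he')
          · exact h3 e' (by simp [he']) x hx
    · exact ih d hnd.2 h1 h2 (fun e' he' => h3 e' (by simp [he']))

theorem pvOuterB_inv (ps : List (List (Int × Int × Int × Int × Int) × List (Int × Int × Int × Int × Int))) :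
    ∀ (s : Int) (d : PySem.Dict Int (List Int)),
    (∀ p ∈ ps, (p.1.map (fun x => x.1)).Nodup) →
    (∀ k, List.Pairwise (· < ·) (d.getD k [])) →
    (∀ k x, x ∈ d.getD k [] → x ≤ s) →
    ∀ k, List.Pairwise (· < ·)
      (((PySem.List.enumerate ps s).foldl
        (fun d2 ip => matchStepB ip.1 ip.2.1 ip.2.2 d2) d).getD k []) := by
  induction ps with
  | nil => intro s d _ h1 _ k; exact h1 k
  | cons p ps ih =>
    intro s d hnd h1 h2
    rw [PySem.List.enumerate_cons, List.foldl_cons]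
    have hstep := pvInnerB_inv s p.2 p.1 d (hnd p (by simp)) h1
      (fun k x hx => by have := h2 k x hx; omega) (fun e _ x hx => h2 _ x hx)
    exact ih (s + 1) _ (fun q hq => hnd q (by simp [hq]))
      (fun k => (hstep k).1) (fun k x hx => (hstep k).2 x hx)

theorem pvRebuild (d : PySem.Dict Int (List Int)) (h : d.keys.Nodup) :
    d.items.foldl (fun d2 kv => d2.insert kv.1 kv.2) PySem.Dict.empty = d := by
  apply PySem.Dict.ext
  rw [PySem.Dict.items_foldl_insert_fresh d.items (fun kv => kv.1) (fun kv => kv.2)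
    PySem.Dict.empty (fun a _ => PySem.Dict.contains_empty _) h]
  rw [show (PySem.Dict.empty : PySem.Dict Int (List Int)).items = [] from rfl]
  simp

-- one inner pass of A's new_counts loop, on the dict level
theorem pvInnerDict (k0 : Int) (cond : Int → Prop) [DecidablePred cond] (g : Int → Int) :
    ∀ (l : List Int) (d : PySem.Dict Int (List Int)), d.contains k0 = true →
    ((l.foldl (fun d2 i => if cond i then d2.modify k0 [] (fun v => v ++ [g i]) else d2) d).getD k0 []
        = d.getD k0 [] ++ (l.filter (fun i => decide (cond i))).map g)
    ∧ (∀ k', k' ≠ k0 →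
        (l.foldl (fun d2 i => if cond i then d2.modify k0 [] (fun v => v ++ [g i]) else d2) d).getD k' []
        = d.getD k' [])
    ∧ (l.foldl (fun d2 i => if cond i then d2.modify k0 [] (fun v => v ++ [g i]) else d2) d).keys
        = d.keys := by
  intro l
  induction l with
  | nil => intro d _; exact ⟨by simp, fun _ _ => rfl, rfl⟩
  | cons i l ih =>
    intro d hc
    simp only [List.foldl_cons]
    by_cases hcond : cond i
    · rw [if_pos hcond]
      have hkeys : (d.modify k0 [] (fun v => v ++ [g i])).keys = d.keys := by
        rw [PySem.Dict.keys_modify, PySem.Dict.keys_insert_of_contains _ _ hc]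
      have hc' : (d.modify k0 [] (fun v => v ++ [g i])).contains k0 = true := by
        rw [PySem.Dict.contains_iff_mem_keys, hkeys, ← PySem.Dict.contains_iff_mem_keys]
        exact hc
      obtain ⟨ha, hb, hk⟩ := ih _ hc'
      refine ⟨?_, ?_, by rw [hk, hkeys]⟩
      · rw [ha, PySem.Dict.getD_modify_self]
        simp [hcond, List.append_assoc]
      · intro k' hk'
        rw [hb k' hk', PySem.Dict.getD_modify_of_ne _ _ _ hk']
    · rw [if_neg hcond]
      obtain ⟨ha, hb, hk⟩ := ih d hc
      refine ⟨?_, hb, hk⟩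
      rw [ha]
      simp [hcond]

-- the whole new_counts loop over the key list
theorem pvNewCounts (C : PySem.Dict Int (List Int)) :
    ∀ (ks : List Int) (d : PySem.Dict Int (List Int)), ks.Nodup →
    (∀ k ∈ ks, d.contains k = true) →
    ((∀ k', (ks.foldl (fun d2 k =>
        (PySem.List.pyRange 0 (((C.getD k []).length : Int) - 1) 1).foldl (fun d3 i =>
          if PySem.List.pyGetD (C.getD k []) i 0 =
             PySem.List.pyGetD (C.getD k []) (i + 1) 0 - 1 then
            d3.modify k [] (fun v => v ++ [PySem.List.pyGetD (C.getD k []) i 0])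
          else d3) d2) d).getD k' []
      = if k' ∈ ks then d.getD k' [] ++ pvPass (C.getD k' []) else d.getD k' [])
    ∧ (ks.foldl (fun d2 k =>
        (PySem.List.pyRange 0 (((C.getD k []).length : Int) - 1) 1).foldl (fun d3 i =>
          if PySem.List.pyGetD (C.getD k []) i 0 =
             PySem.List.pyGetD (C.getD k []) (i + 1) 0 - 1 then
            d3.modify k [] (fun v => v ++ [PySem.List.pyGetD (C.getD k []) i 0])
          else d3) d2) d).keys = d.keys) := by
  intro ks
  induction ks with
  | nil => intro d _ _; exact ⟨fun k' => by simp, rfl⟩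
  | cons k ks ih =>
    intro d hnd hcont
    simp only [List.nodup_cons] at hnd
    simp only [List.foldl_cons]
    have h0 := pvInnerDict k
      (fun i => PySem.List.pyGetD (C.getD k []) i 0 =
        PySem.List.pyGetD (C.getD k []) (i + 1) 0 - 1)
      (fun i => PySem.List.pyGetD (C.getD k []) i 0)
      (PySem.List.pyRange 0 (((C.getD k []).length : Int) - 1) 1) d
      (hcont k (by simp))
    obtain ⟨ha, hb, hk⟩ := h0
    have hcont' : ∀ q ∈ ks,
        ((PySem.List.pyRange 0 (((C.getD k []).length : Int) - 1) 1).foldl (fun d3 i =>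
          if PySem.List.pyGetD (C.getD k []) i 0 =
             PySem.List.pyGetD (C.getD k []) (i + 1) 0 - 1 then
            d3.modify k [] (fun v => v ++ [PySem.List.pyGetD (C.getD k []) i 0])
          else d3) d).contains q = true := by
      intro q hq
      rw [PySem.Dict.contains_iff_mem_keys, hk, ← PySem.Dict.contains_iff_mem_keys]
      exact hcont q (by simp [hq])
    obtain ⟨ha2, hk2⟩ := ih _ hnd.2 hcont'
    refine ⟨?_, by rw [hk2, hk]⟩
    intro k'
    rw [ha2 k']
    by_cases hmem : k' ∈ ks
    · have hne : k' ≠ k := fun hc => hnd.1 (hc ▸ hmem)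
      simp only [if_pos hmem, if_pos (List.mem_cons_of_mem _ hmem), hb k' hne]
    · by_cases heq : k' = k
      · subst heq
        simp only [if_neg hmem, if_pos (by simp : k' ∈ k' :: ks)]
        rw [ha]
        rfl
      · simp only [if_neg hmem, if_neg (by simp [heq, hmem] : ¬ k' ∈ k :: ks)]
        exact hb k' heq

theorem pvPipeline (C : PySem.Dict Int (List Int)) (hnd : C.keys.Nodup)
    (hpair : ∀ k, List.Pairwise (· < ·) (C.getD k [])) :
    (let counts2 := C.items.foldl (fun d kv => d.insert kv.1 kv.2) PySem.Dict.empty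
     let new0 := counts2.keys.foldl (fun d k => d.insert k ([] : List Int)) PySem.Dict.empty
     let new_counts := counts2.keys.foldl (fun d k =>
       (PySem.List.pyRange 0 (((counts2.getD k []).length : Int) - 1) 1).foldl (fun d2 i =>
         if PySem.List.pyGetD (counts2.getD k []) i 0 =
            PySem.List.pyGetD (counts2.getD k []) (i + 1) 0 - 1 then
           d2.modify k [] (fun v => v ++ [PySem.List.pyGetD (counts2.getD k []) i 0])
         else d2) d) new0
     let new_new := new_counts.keys.foldl
       (fun d k => d.insert k (longest_consecutive_subarray (new_counts.getD k [])))
       PySem.Dict.empty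
     new_new.keys.foldl
       (fun stills k => if new_new.getD k 0 ≥ (5 : Int) then stills ++ [k] else stills) [])
    = C.items.foldl
        (fun stills kv => if bestRun kv.2 - 1 ≥ (5 : Int) then stills ++ [kv.1] else stills) [] := by
  simp only [pvRebuild C hnd]
  have hkeysid : (List.map (fun a => a) C.keys).Nodup := by simpa using hnd
  have h0items : (C.keys.foldl (fun d k => d.insert k ([] : List Int)) PySem.Dict.empty).items
      = C.keys.map (fun k => (k, ([] : List Int))) := by
    have := PySem.Dict.items_foldl_insert_fresh C.keys (fun a => a) (fun _ => ([] : List Int))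
      PySem.Dict.empty (fun a _ => PySem.Dict.contains_empty _) hkeysid
    simpa using this
  have h0keys : (C.keys.foldl (fun d k => d.insert k ([] : List Int)) PySem.Dict.empty).keys
      = C.keys := by
    have h := PySem.Dict.keys_foldl_insert C.keys
      (fun _ _ => ([] : List Int)) PySem.Dict.empty
    exact h.trans (PySem.Set.ofList_eq_self_of_nodup C.keys hnd)
  have h0getD : ∀ k, (C.keys.foldl (fun d k => d.insert k ([] : List Int)) PySem.Dict.empty).getD k []
      = [] := by
    intro k
    by_cases hk : k ∈ C.keys
    · refine PySem.Dict.getD_of_mem_items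
        (C.keys.foldl (fun d k => d.insert k ([] : List Int)) PySem.Dict.empty)
        (v := []) ?_ (by rw [h0keys]; exact hnd) []
      rw [h0items]
      exact List.mem_map_of_mem hk
    · refine PySem.Dict.getD_of_not_contains
        (C.keys.foldl (fun d k => d.insert k ([] : List Int)) PySem.Dict.empty) (k := k) [] ?_
      have : ¬ ((C.keys.foldl (fun d k => d.insert k ([] : List Int)) PySem.Dict.empty).contains k = true) := by
        rw [PySem.Dict.contains_iff_mem_keys, h0keys]; exact hk
      exact Bool.eq_false_iff.mpr (fun hc => this hc)
  have h0cont : ∀ k ∈ C.keys,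
      (C.keys.foldl (fun d k => d.insert k ([] : List Int)) PySem.Dict.empty).contains k = true := by
    intro k hk
    rw [PySem.Dict.contains_iff_mem_keys, h0keys]; exact hk
  obtain ⟨hNCget, hNCkeys⟩ := pvNewCounts C C.keys
    (C.keys.foldl (fun d k => d.insert k ([] : List Int)) PySem.Dict.empty) hnd h0cont
  have hnewcget : ∀ k ∈ C.keys,
      (C.keys.foldl (fun d2 k =>
        (PySem.List.pyRange 0 (((C.getD k []).length : Int) - 1) 1).foldl (fun d3 i =>
          if PySem.List.pyGetD (C.getD k []) i 0 =
             PySem.List.pyGetD (C.getD k []) (i + 1) 0 - 1 then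
            d3.modify k [] (fun v => v ++ [PySem.List.pyGetD (C.getD k []) i 0])
          else d3) d2)
        (C.keys.foldl (fun d k => d.insert k ([] : List Int)) PySem.Dict.empty)).getD k []
      = pvPass (C.getD k []) := by
    intro k hk
    rw [hNCget k, if_pos hk, h0getD k]
    simp
  have hnewckeys :
      (C.keys.foldl (fun d2 k =>
        (PySem.List.pyRange 0 (((C.getD k []).length : Int) - 1) 1).foldl (fun d3 i =>
          if PySem.List.pyGetD (C.getD k []) i 0 =
             PySem.List.pyGetD (C.getD k []) (i + 1) 0 - 1 then
            d3.modify k [] (fun v => v ++ [PySem.List.pyGetD (C.getD k []) i 0])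
          else d3) d2)
        (C.keys.foldl (fun d k => d.insert k ([] : List Int)) PySem.Dict.empty)).keys
      = C.keys := hNCkeys.trans h0keys
  rw [hnewckeys]
  have hnnkeys : (C.keys.foldl (fun d k => d.insert k (longest_consecutive_subarray
      ((C.keys.foldl (fun d2 k =>
        (PySem.List.pyRange 0 (((C.getD k []).length : Int) - 1) 1).foldl (fun d3 i =>
          if PySem.List.pyGetD (C.getD k []) i 0 =
             PySem.List.pyGetD (C.getD k []) (i + 1) 0 - 1 then
            d3.modify k [] (fun v => v ++ [PySem.List.pyGetD (C.getD k []) i 0])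
          else d3) d2)
        (C.keys.foldl (fun d k => d.insert k ([] : List Int)) PySem.Dict.empty)).getD k [])))
      PySem.Dict.empty).keys = C.keys := by
    have h := PySem.Dict.keys_foldl_insert C.keys
      (fun _ k => longest_consecutive_subarray
      ((C.keys.foldl (fun d2 k =>
        (PySem.List.pyRange 0 (((C.getD k []).length : Int) - 1) 1).foldl (fun d3 i =>
          if PySem.List.pyGetD (C.getD k []) i 0 =
             PySem.List.pyGetD (C.getD k []) (i + 1) 0 - 1 then
            d3.modify k [] (fun v => v ++ [PySem.List.pyGetD (C.getD k []) i 0])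
          else d3) d2)
        (C.keys.foldl (fun d k => d.insert k ([] : List Int)) PySem.Dict.empty)).getD k []))
      PySem.Dict.empty
    exact h.trans (PySem.Set.ofList_eq_self_of_nodup C.keys hnd)
  have hnnitems : (C.keys.foldl (fun d k => d.insert k (longest_consecutive_subarray
      ((C.keys.foldl (fun d2 k =>
        (PySem.List.pyRange 0 (((C.getD k []).length : Int) - 1) 1).foldl (fun d3 i =>
          if PySem.List.pyGetD (C.getD k []) i 0 =
             PySem.List.pyGetD (C.getD k []) (i + 1) 0 - 1 then
            d3.modify k [] (fun v => v ++ [PySem.List.pyGetD (C.getD k []) i 0])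
          else d3) d2)
        (C.keys.foldl (fun d k => d.insert k ([] : List Int)) PySem.Dict.empty)).getD k [])))
      PySem.Dict.empty).items
      = C.keys.map (fun k => (k, longest_consecutive_subarray (pvPass (C.getD k [])))) := by
    have h := PySem.Dict.items_foldl_insert_fresh C.keys (fun a => a)
      (fun k => longest_consecutive_subarray
      ((C.keys.foldl (fun d2 k =>
        (PySem.List.pyRange 0 (((C.getD k []).length : Int) - 1) 1).foldl (fun d3 i =>
          if PySem.List.pyGetD (C.getD k []) i 0 =
             PySem.List.pyGetD (C.getD k []) (i + 1) 0 - 1 then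
            d3.modify k [] (fun v => v ++ [PySem.List.pyGetD (C.getD k []) i 0])
          else d3) d2)
        (C.keys.foldl (fun d k => d.insert k ([] : List Int)) PySem.Dict.empty)).getD k []))
      PySem.Dict.empty (fun a _ => PySem.Dict.contains_empty _) hkeysid
    rw [show (PySem.Dict.empty : PySem.Dict Int Int).items = [] from rfl] at h
    rw [h]
    simp only [List.nil_append]
    apply List.map_congr_left
    intro k hk
    rw [hnewcget k hk]
  rw [hnnkeys]
  rw [PySem.List.foldl_append_ite_eq_filter _ C.keys []]
  rw [PySem.List.foldl_append_ite _ (fun kv => kv.1) C.items []]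
  rw [PySem.Dict.items_eq_map_keys C hnd [], List.filter_map, List.map_map]
  simp only [List.nil_append, Function.comp_def]
  show _ = List.map (fun k : Int => k)
      (List.filter (fun k => decide (bestRun (C.getD k []) - 1 ≥ 5)) C.keys)
  rw [List.map_id'']
  apply List.filter_congr
  intro k hk
  have hget : (C.keys.foldl (fun d k => d.insert k (longest_consecutive_subarray
      ((C.keys.foldl (fun d2 k =>
        (PySem.List.pyRange 0 (((C.getD k []).length : Int) - 1) 1).foldl (fun d3 i =>
          if PySem.List.pyGetD (C.getD k []) i 0 =
             PySem.List.pyGetD (C.getD k []) (i + 1) 0 - 1 then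
            d3.modify k [] (fun v => v ++ [PySem.List.pyGetD (C.getD k []) i 0])
          else d3) d2)
        (C.keys.foldl (fun d k => d.insert k ([] : List Int)) PySem.Dict.empty)).getD k [])))
      PySem.Dict.empty).getD k 0
      = longest_consecutive_subarray (pvPass (C.getD k [])) := by
    refine PySem.Dict.getD_of_mem_items _ ?_ (by rw [hnnkeys]; exact hnd) 0
    rw [hnnitems]
    exact List.mem_map_of_mem hk
  rw [hget]
  exact decide_eq_decide.mpr (pvCondKey (C.getD k []) (hpair k))
  exact fun x => rfl

theorem pvMain (all_ars : List (List (Int × Int × Int × Int × Int)))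
    (hpre : ∀ inst ∈ all_ars, (inst.map (fun x => x.1)).Nodup) :
    get_still_arnos all_ars = get_still_arnos_alt all_ars := by
  have hc := pvCounts_eq all_ars hpre
  have hzmem : ∀ p ∈ all_ars.zip (PySem.List.slice all_ars (some 1) none),
      (p.1.map (fun x => x.1)).Nodup := by
    intro p hp
    exact hpre p.1 (List.of_mem_zip hp).1
  have hCnodup := pvOuterB_nodup (all_ars.zip (PySem.List.slice all_ars (some 1) none))
    0 PySem.Dict.empty
    (by rw [show (PySem.Dict.empty : PySem.Dict Int (List Int)).keys = [] from rfl]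
        exact List.nodup_nil)
  have hCpair := pvOuterB_inv (all_ars.zip (PySem.List.slice all_ars (some 1) none))
    0 PySem.Dict.empty hzmem
    (fun k => by rw [PySem.Dict.getD_empty]; exact List.Pairwise.nil)
    (fun k x hx => by rw [PySem.Dict.getD_empty] at hx; simp at hx)
  have h2 := congrArg (fun C : PySem.Dict Int (List Int) =>
    (let counts2 := C.items.foldl (fun d kv => d.insert kv.1 kv.2) PySem.Dict.empty
     let new0 := counts2.keys.foldl (fun d k => d.insert k ([] : List Int)) PySem.Dict.empty
     let new_counts := counts2.keys.foldl (fun d k =>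
       (PySem.List.pyRange 0 (((counts2.getD k []).length : Int) - 1) 1).foldl (fun d2 i =>
         if PySem.List.pyGetD (counts2.getD k []) i 0 =
            PySem.List.pyGetD (counts2.getD k []) (i + 1) 0 - 1 then
           d2.modify k [] (fun v => v ++ [PySem.List.pyGetD (counts2.getD k []) i 0])
         else d2) d) new0
     let new_new := new_counts.keys.foldl
       (fun d k => d.insert k (longest_consecutive_subarray (new_counts.getD k [])))
       PySem.Dict.empty
     new_new.keys.foldl
       (fun stills k => if new_new.getD k 0 ≥ (5 : Int) then stills ++ [k] else stills) [])) hc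
  exact h2.trans (pvPipeline _ hCnodup hCpair)

-- ===== VERDICT (by name: the statement is the Claim_ definition above) =====
theorem get_still_arnos_spec : Claim_equal_get_still_arnos := by
  intro all_ars _ hpre
  show get_still_arnos all_ars = get_still_arnos_alt all_ars
  exact pvMain all_ars hpre
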